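-- pv_equiv track=rewrite | github.com/alexandremr01/propagation-code-optimization | optimizer/algorithms/curious_simulated_annealing.py | ungroup_particles
-- ===== SOURCE A (Python) =====
-- def ungroup_particles(particles):
--     list_pointer = 0
--     new_particles = []
--     list_indexes = [0] * len(particles)
--     while list_indexes[list_pointer] != len(particles[list_pointer]):
--         index_in_list = list_indexes[list_pointer]
--         new_particles.append(particles[list_pointer][index_in_list])
--         list_indexes[list_pointer] += 1
--         list_pointer = (list_pointer+1) % len(particles)
--     return new_particles
-- ===== SOURCE B (Python) =====
-- def ungroup_particles(particles):
--     # Closed-form: the round-robin stops after T = min length complete rounds,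
--     # at the first sublist j whose length is T.  Build the output directly.
--     lens = [len(sub) for sub in particles]
--     T = min(lens)
--     j = lens.index(T)
--     out = [sub[t] for t in range(T) for sub in particles]
--     out += [sub[T] for sub in particles[:j]]
--     return out
-- ===== Notes on version B (the rewrite author's own statement) =====
-- stated objective: alternative
-- what changed: Instead of simulating the round-robin step by step with a modulo-advanced pointer and a per-list index array, B computes the stopping point in closed form (T = min sublist length = number of complete rounds, j = index of the first sublist of length T) and builds the output directly by comprehensions (T full columns plus the first j entries of column T); dropping the per-element interpreted loop with modulo/index bookkeeping makes it measurably faster by a constant factor.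
import Mathlib
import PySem

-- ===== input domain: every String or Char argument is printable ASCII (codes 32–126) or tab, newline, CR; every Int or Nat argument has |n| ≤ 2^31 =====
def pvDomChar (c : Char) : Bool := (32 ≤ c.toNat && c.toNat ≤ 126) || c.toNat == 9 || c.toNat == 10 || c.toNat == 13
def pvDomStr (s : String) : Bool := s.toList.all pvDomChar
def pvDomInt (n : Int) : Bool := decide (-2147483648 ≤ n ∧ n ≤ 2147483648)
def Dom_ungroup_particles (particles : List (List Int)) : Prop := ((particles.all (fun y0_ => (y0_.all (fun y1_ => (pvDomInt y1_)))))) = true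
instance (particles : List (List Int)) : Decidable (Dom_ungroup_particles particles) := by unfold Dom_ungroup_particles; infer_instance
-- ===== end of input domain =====

-- B replaces A's step-by-step round-robin simulation by a closed-form construction:
-- it computes the stopping point analytically (T = min length = number of complete
-- rounds, j = index of the first sublist of length T) and builds the output directly
-- by comprehensions (objective: alternative).

-- ===== PORT A =====
-- A's while loop as a fueled recursion over the SAME state (list_pointer p, list_indexes
-- idx, accumulator acc); `none` would mean fuel exhaustion, and the supplied fuel
-- (len(particles[0]) * len(particles) + 1) is proved sufficient below (loopA never
-- returns none on inputs admitted by Pre_).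
def loopA (particles : List (List Int)) : Nat → Nat → List Nat → List Int → Option (List Int)
  | 0, _, _, _ => none
  | f + 1, p, idx, acc =>
    let i := idx.getD p 0
    if i = (particles.getD p []).length then some acc
    else loopA particles f ((p + 1) % particles.length) (idx.set p (i + 1))
           (acc ++ [(particles.getD p []).getD i 0])

def ungroup_particles (particles : List (List Int)) : List Int :=
  (loopA particles ((particles.headD []).length * particles.length + 1) 0
      (List.replicate particles.length 0) []).getD []

-- ===== PORT B =====
-- lens = [len(sub) for sub in particles]; T = min(lens); j = lens.index(T);
-- the comprehension indices are always in range (t < T ≤ len sub, and every sub in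
-- particles[:j] has T < len sub), so List.getD is exact for sub[t] / sub[T].
-- min(lens) raises ValueError on empty input (excluded by Pre_); the .getD 0 on
-- min?/index? are unreachable under Pre_ (lens is nonempty and T ∈ lens).
def ungroup_particles_alt (particles : List (List Int)) : List Int :=
  let lens := particles.map List.length
  let T := (PySem.List.min? lens (fun x => x)).getD 0
  let j := (PySem.List.index? lens T).getD 0
  ((List.range T).flatMap (fun t => particles.map (fun sub => sub.getD t 0)))
    ++ (particles.take j).map (fun sub => sub.getD T 0)

-- ===== PRECONDITION & SPEC =====
-- Python A raises IndexError on empty `particles` (B raises ValueError there); nothing else is excluded.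
def Pre_ungroup_particles (particles : List (List Int)) : Prop := particles ≠ []
instance (particles : List (List Int)) : Decidable (Pre_ungroup_particles particles) := by
  unfold Pre_ungroup_particles; infer_instance

def pvWitness_ungroup_particles : List (List Int) := [[1, 2], [3], [4, 5]]

def Spec_ungroup_particles (particles : List (List Int)) (out : List Int) : Prop := out = ungroup_particles_alt particles
instance (particles : List (List Int)) (out : List Int) : Decidable (Spec_ungroup_particles particles out) := by unfold Spec_ungroup_particles; infer_instance

-- ===== CLAIM (what is proved, stated in full; the proofs are below) =====
def Claim_equal_ungroup_particles : Prop := ∀ (particles : List (List Int)), Dom_ungroup_particles particles → Pre_ungroup_particles particles → Spec_ungroup_particles particles (ungroup_particles particles)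

-- ===== LEMMAS AND PROOFS =====

-- Proof-only bridge: one full round of A's loop over the sublists in index order,
-- either completing the round (.inr) or stopping at an exhausted sublist (.inl).
def innerB (t : Nat) : List (List Int) → List Int → (List Int) ⊕ (List Int)
  | [], acc => .inr acc
  | sub :: rest, acc =>
    if sub.length ≤ t then .inl acc
    else innerB t rest (acc ++ [sub.getD t 0])

lemma set_append_mid (l1 l2 : List Nat) (a b : Nat) :
    (l1 ++ a :: l2).set l1.length b = l1 ++ b :: l2 := by
  induction l1 with
  | nil => rfl
  | cons x xs ih => simp [ih]

-- A round with no exhausted sublist appends exactly column t.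
lemma innerB_full (t : Nat) (subs : List (List Int)) (acc : List Int)
    (h : ∀ sub ∈ subs, t < sub.length) :
    innerB t subs acc = .inr (acc ++ subs.map (fun s => s.getD t 0)) := by
  induction subs generalizing acc with
  | nil => simp [innerB]
  | cons sub rest ih =>
    have h1 : t < sub.length := h sub (by simp)
    simp only [innerB, if_neg (by omega : ¬ sub.length ≤ t)]
    rw [ih _ (fun s hs => h s (by simp [hs]))]
    simp

-- A round stopping at the first exhausted sublist j appends exactly the first j entries
-- of column t.
lemma innerB_stop (t : Nat) (subs : List (List Int)) (j : Nat) (acc : List Int)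
    (hjlt : j < subs.length)
    (hstop : (subs.getD j []).length ≤ t)
    (hbefore : ∀ i < j, t < (subs.getD i []).length) :
    innerB t subs acc = .inl (acc ++ (subs.take j).map (fun s => s.getD t 0)) := by
  induction subs generalizing j acc with
  | nil => simp at hjlt
  | cons sub rest ih =>
    cases j with
    | zero =>
      simp [List.getD] at hstop
      simp [innerB, if_pos hstop]
    | succ j' =>
      have h0 : t < sub.length := by
        have := hbefore 0 (by omega); simpa [List.getD] using this
      simp only [innerB, if_neg (by omega : ¬ sub.length ≤ t)]
      rw [ih j' _ (by simpa using hjlt) (by simpa [List.getD] using hstop)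
          (fun i hi => by simpa [List.getD] using hbefore (i + 1) (by omega))]
      simp

-- One round: loopA from pointer p (indexes: first p entries t+1, rest t) simulates
-- innerB on the suffix `particles.drop p`.
lemma round_lemma (particles : List (List Int)) (t : Nat)
    (hT : ∀ sub ∈ particles, t ≤ sub.length) :
    ∀ (k p : Nat) (acc : List Int) (f : Nat), p + k = particles.length → 0 < k →
    loopA particles (f + k) p (List.replicate p (t + 1) ++ List.replicate k t) acc =
      (match innerB t (particles.drop p) acc with
       | .inl r => some r
       | .inr acc' => loopA particles f 0 (List.replicate particles.length (t + 1)) acc') := by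
  intro k
  induction k with
  | zero => intro p acc f _ h; omega
  | succ k ih =>
    intro p acc f hpk _
    have hp : p < particles.length := by omega
    obtain ⟨sub, hsub⟩ : ∃ sub, particles[p]? = some sub := by
      exact ⟨particles[p], List.getElem?_eq_getElem hp⟩
    have hdrop : particles.drop p = sub :: particles.drop (p + 1) := by
      have h0 : (particles.drop p)[0]? = some sub := by
        rw [List.getElem?_drop]; simpa using hsub
      cases hd : particles.drop p with
      | nil => rw [hd] at h0; simp at h0
      | cons x xs =>
        rw [hd] at h0; simp at h0
        subst h0
        have h2 : (particles.drop p).drop 1 = particles.drop (p + 1) := by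
          simp [List.drop_drop]
        rw [hd] at h2; simp at h2; rw [h2]
    have hmem : sub ∈ particles := List.mem_of_getElem? hsub
    have hget : particles.getD p [] = sub := by simp [List.getD, hsub]
    have hidx : (List.replicate p (t + 1) ++ List.replicate (k + 1) t).getD p 0 = t := by
      simp [List.getD, List.length_replicate]
    have hrep : List.replicate (k + 1) t = t :: List.replicate k t := rfl
    have hset : (List.replicate p (t + 1) ++ List.replicate (k + 1) t).set p (t + 1)
        = List.replicate (p + 1) (t + 1) ++ List.replicate k t := by
      rw [hrep]
      have := set_append_mid (List.replicate p (t + 1)) (List.replicate k t) t (t + 1)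
      simp only [List.length_replicate] at this
      rw [this, List.replicate_succ' (n := p)]
      simp
    have hfuel : f + (k + 1) = (f + k) + 1 := by omega
    rw [hfuel]
    simp only [loopA, hidx, hget, hdrop, innerB]
    by_cases hc : t = sub.length
    · have : sub.length ≤ t := by omega
      simp [hc]
    · have hlt : t < sub.length := lt_of_le_of_ne (hT sub hmem) hc
      have hnc : ¬ sub.length ≤ t := by omega
      simp only [if_neg hc, if_neg hnc, hset]
      by_cases hk : k = 0
      · subst hk
        have hpn : p + 1 = particles.length := by omega
        have : (p + 1) % particles.length = 0 := by rw [hpn]; exact Nat.mod_self _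
        rw [this]
        have hde : particles.drop (p + 1) = [] := by
          apply List.drop_eq_nil_of_le; omega
        simp [innerB, hpn]
      · have hlt2 : p + 1 < particles.length := by omega
        have hmod : (p + 1) % particles.length = p + 1 := Nat.mod_eq_of_lt hlt2
        rw [hmod, ih (p + 1) (acc ++ [sub.getD t 0]) f (by omega) (by omega)]

-- The outer induction: from round t (all sublists still have ≥ t elements left to give,
-- i.e. t ≤ T), A's loop appends columns t .. T-1 and then the partial column T.
lemma main_lemma (x : List Int) (xs : List (List Int)) (T j : Nat)
    (hTle : ∀ sub ∈ x :: xs, T ≤ sub.length)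
    (hjlt : j < (x :: xs).length)
    (hstop : ((x :: xs).getD j []).length = T)
    (hbefore : ∀ i < j, T < ((x :: xs).getD i []).length)
    (hj0 : T = x.length → j = 0) :
    ∀ (d t : Nat) (acc : List Int), T - t = d → t ≤ T →
    loopA (x :: xs) ((x.length - t) * (x :: xs).length + 1) 0
        (List.replicate (x :: xs).length t) acc
      = some (acc ++ (List.range' t (T - t)).flatMap
            (fun u => (x :: xs).map (fun sub => sub.getD u 0))
          ++ ((x :: xs).take j).map (fun sub => sub.getD T 0)) := by
  intro d
  induction d with
  | zero =>
    intro t acc hd ht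
    have htT : t = T := by omega
    subst htT
    by_cases hx : t = x.length
    · have hjz : j = 0 := hj0 hx
      have hidx : (List.replicate (x :: xs).length t).getD 0 0 = t := by
        simp [List.getD]
      simp only [loopA, hidx]
      rw [if_pos (by simpa [List.getD] using hx)]
      simp [hjz]
    · have hlt : t < x.length := lt_of_le_of_ne (hTle x (by simp)) hx
      have hm : x.length - t = (x.length - (t + 1)) + 1 := by omega
      have hfuel : (x.length - t) * (x :: xs).length + 1
          = ((x.length - (t + 1)) * (x :: xs).length + 1) + (x :: xs).length := by
        rw [hm]; ring
      have hrl := round_lemma (x :: xs) t hTle (x :: xs).length 0 acc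
        ((x.length - (t + 1)) * (x :: xs).length + 1) (by simp) (by simp)
      simp only [List.replicate_zero, List.nil_append, List.drop_zero] at hrl
      rw [hfuel, hrl, innerB_stop t (x :: xs) j acc hjlt (by omega)
        (fun i hi => hbefore i hi)]
      simp
  | succ d ih =>
    intro t acc hd ht
    have htT : t < T := by omega
    have hlt : t < x.length := lt_of_lt_of_le htT (hTle x (by simp))
    have hfuel : (x.length - t) * (x :: xs).length + 1
        = ((x.length - (t + 1)) * (x :: xs).length + 1) + (x :: xs).length := by
      have : x.length - t = (x.length - (t + 1)) + 1 := by omega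
      rw [this]; ring
    have hrl := round_lemma (x :: xs) t (fun s hs => le_of_lt (lt_of_lt_of_le htT (hTle s hs)))
      (x :: xs).length 0 acc ((x.length - (t + 1)) * (x :: xs).length + 1) (by simp) (by simp)
    simp only [List.replicate_zero, List.nil_append, List.drop_zero] at hrl
    rw [hfuel, hrl, innerB_full t (x :: xs) acc
      (fun s hs => lt_of_lt_of_le htT (hTle s hs))]
    simp only
    rw [ih (t + 1) _ (by omega) (by omega)]
    have hrange : List.range' t (T - t) = t :: List.range' (t + 1) (T - (t + 1)) := by
      have : T - t = (T - (t + 1)) + 1 := by omega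
      rw [this, List.range'_succ]
    rw [hrange]
    simp

-- ===== VERDICT (by name: the statement is the Claim_ definition above) =====
theorem ungroup_particles_spec : Claim_equal_ungroup_particles := by
  intro particles _ hpre
  unfold Spec_ungroup_particles ungroup_particles ungroup_particles_alt
  cases particles with
  | nil => exact absurd rfl hpre
  | cons x xs =>
    simp only [List.headD_cons]
    obtain ⟨T, hmin⟩ : ∃ T, PySem.List.min? ((x :: xs).map List.length) (fun x => x) = some T := by
      cases hm : PySem.List.min? ((x :: xs).map List.length) (fun x => x) with
      | none => rw [PySem.List.min?_eq_none_iff] at hm; simp at hm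
      | some T => exact ⟨T, rfl⟩
    have hTmem : T ∈ (x :: xs).map List.length := PySem.List.min?_mem hmin
    have hTmin : ∀ y ∈ (x :: xs).map List.length, T ≤ y := PySem.List.min?_isMin hmin
    have hTle : ∀ sub ∈ x :: xs, T ≤ sub.length := by
      intro sub hs
      exact hTmin _ (List.mem_map.2 ⟨sub, hs, rfl⟩)
    obtain ⟨j, hidxj⟩ : ∃ j, PySem.List.index? ((x :: xs).map List.length) T = some j := by
      cases hi : PySem.List.index? ((x :: xs).map List.length) T with
      | none =>
        rw [PySem.List.index?_eq_none_iff] at hi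
        exact absurd hTmem hi
      | some j => exact ⟨j, rfl⟩
    obtain ⟨hjlt, hjget, hjfirst⟩ := PySem.List.getElem_of_index?_eq_some hidxj
    rw [List.getElem_map] at hjget
    have hjlt' : j < (x :: xs).length := by simpa using hjlt
    have hstop : ((x :: xs).getD j []).length = T := by
      rw [List.getD_eq_getElem?_getD, List.getElem?_eq_getElem hjlt']
      simpa using hjget
    have hbefore : ∀ i < j, T < ((x :: xs).getD i []).length := by
      intro i hi
      have hilt : i < (x :: xs).length := by omega
      have hne := hjfirst i hi
      rw [List.getElem_map] at hne
      have hge : T ≤ ((x :: xs)[i]'hilt).length :=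
        hTle _ (List.getElem_mem hilt)
      rw [List.getD_eq_getElem?_getD, List.getElem?_eq_getElem hilt]
      simp only [Option.getD_some]
      omega
    have hj0 : T = x.length → j = 0 := by
      intro hTx
      by_contra hjne
      have h0j : 0 < j := Nat.pos_of_ne_zero hjne
      have := hjfirst 0 (by simpa using h0j)
      rw [List.getElem_map] at this
      exact this (by simpa using hTx.symm)
    have hkey := main_lemma x xs T j hTle hjlt' hstop hbefore hj0 T 0 [] (by omega) (by omega)
    simp only [Nat.sub_zero] at hkey
    rw [hkey]
    rw [PySem.List.index?_eq_idxOf?] at hidxj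
    simp only [List.map_cons] at hmin hidxj
    simp [hmin, hidxj, List.range_eq_range']
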